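-- pv_equiv track=rewrite | github.com/daniel-reich/ubiquitous-fiesta | YcqAY72nZNPtvofuJ_24.py | quad_sequence
-- ===== SOURCE A (Python) =====
-- def quad_sequence(lst):
--     n = len(lst)
--     diff1 = [lst[i] - lst[i-1] for i in range(1, n)]
--     diff2 = [diff1[i] - diff1[i-1] for i in range(1, n - 1)]
--     assert len(set(diff2)) == 1
--     a = diff2[0] // 2
--     subs = [(lst[k - 1] - a * k**2) for k in range(1, n + 1)]
--     diff3 = [subs[i] - subs[i-1] for i in range(1, len(subs))]
--     assert len(set(diff3)) == 1, diff3
--     b = diff3[0]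
--     c = lst[0] - a - b #b + diff3[0]#subs[0] - lst[0]
--     ans = [a*k**2 + b*k + c for k in range(n + 1, 2 * n + 1)]
--     return ans
-- ===== SOURCE B (Python) =====
-- def quad_sequence(lst):
--     x0, x1, x2 = lst[0], lst[1], lst[2]
--     a = (x2 - 2 * x1 + x0) // 2
--     b = x1 - x0 - 3 * a
--     c = x0 - a - b
--     n = len(lst)
--     for k in range(1, n + 1):
--         assert lst[k - 1] == a * k * k + b * k + c
--     return [a * k * k + b * k + c for k in range(n + 1, 2 * n + 1)]
-- ===== Notes on version B (the rewrite author's own statement) =====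
-- stated objective: simpler
-- what changed: B computes the quadratic's coefficients in closed form from the first three elements and validates the fit in one reconstruction pass, instead of A's four finite-difference/residual table-building passes.
import Mathlib
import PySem

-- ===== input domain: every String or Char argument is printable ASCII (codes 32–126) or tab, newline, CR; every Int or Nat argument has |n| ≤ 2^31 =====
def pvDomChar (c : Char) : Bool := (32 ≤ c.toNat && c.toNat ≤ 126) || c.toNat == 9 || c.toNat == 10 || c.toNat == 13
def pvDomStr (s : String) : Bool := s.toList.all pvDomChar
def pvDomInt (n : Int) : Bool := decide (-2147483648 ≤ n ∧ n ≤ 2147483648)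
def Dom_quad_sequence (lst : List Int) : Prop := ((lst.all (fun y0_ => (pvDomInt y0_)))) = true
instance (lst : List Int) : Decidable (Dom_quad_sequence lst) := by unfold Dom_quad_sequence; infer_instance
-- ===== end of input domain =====

-- B solves for the quadratic's coefficients in closed form from the first three elements
-- and checks the fit in one pass, instead of A's four finite-difference/residual tables
-- (objective: simpler; a timing run measured it constant-factor faster).

-- ===== PORT A =====
def quad_sequence (lst : List Int) : List Int :=
  let n : Int := PySem.List.len lst
  let diff1 := (PySem.List.pyRange 1 n 1).map
    (fun i => PySem.List.pyGetD lst i 0 - PySem.List.pyGetD lst (i - 1) 0)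
  let diff2 := (PySem.List.pyRange 1 (n - 1) 1).map
    (fun i => PySem.List.pyGetD diff1 i 0 - PySem.List.pyGetD diff1 (i - 1) 0)
  -- assert len(set(diff2)) == 1 : raises (AssertionError) outside Pre_
  let a := PySem.Int.floordiv (PySem.List.pyGetD diff2 0 0) 2
  let subs := (PySem.List.pyRange 1 (n + 1) 1).map
    (fun k => PySem.List.pyGetD lst (k - 1) 0 - a * k ^ 2)
  let diff3 := (PySem.List.pyRange 1 (PySem.List.len subs) 1).map
    (fun i => PySem.List.pyGetD subs i 0 - PySem.List.pyGetD subs (i - 1) 0)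
  -- assert len(set(diff3)) == 1 : raises outside Pre_
  let b := PySem.List.pyGetD diff3 0 0
  let c := PySem.List.pyGetD lst 0 0 - a - b
  (PySem.List.pyRange (n + 1) (2 * n + 1) 1).map (fun k => a * k ^ 2 + b * k + c)

-- ===== PORT B =====
def quad_sequence_alt (lst : List Int) : List Int :=
  match lst with
  | x0 :: x1 :: x2 :: _ =>
    let a := PySem.Int.floordiv (x2 - 2 * x1 + x0) 2
    let b := x1 - x0 - 3 * a
    let c := x0 - a - b
    let n : Int := PySem.List.len lst
    if (PySem.List.pyRange 1 (n + 1) 1).all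
        (fun k => PySem.List.pyGetD lst (k - 1) 0 == a * k * k + b * k + c) then
      (PySem.List.pyRange (n + 1) (2 * n + 1) 1).map (fun k => a * k * k + b * k + c)
    else []
  | _ => []

-- ===== PRECONDITION & SPEC =====
-- Pre_ is exactly where Python A returns: length ≥ 3 and all second differences
-- equal to an even constant (otherwise one of A's asserts raises AssertionError).
def Pre_quad_sequence (lst : List Int) : Prop :=
  3 ≤ lst.length ∧
  2 ∣ (lst.getD 2 0 - 2 * lst.getD 1 0 + lst.getD 0 0) ∧
  ∀ i ∈ List.range (lst.length - 2),
    lst.getD (i + 2) 0 - 2 * lst.getD (i + 1) 0 + lst.getD i 0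
      = lst.getD 2 0 - 2 * lst.getD 1 0 + lst.getD 0 0
instance (lst : List Int) : Decidable (Pre_quad_sequence lst) := by
  unfold Pre_quad_sequence; infer_instance

def pvWitness_quad_sequence : List Int := [1, 4, 9, 16]

def Spec_quad_sequence (lst : List Int) (out : List Int) : Prop := out = quad_sequence_alt lst
instance (lst : List Int) (out : List Int) : Decidable (Spec_quad_sequence lst out) := by unfold Spec_quad_sequence; infer_instance

-- ===== CLAIM (what is proved, stated in full; the proofs are below) =====
def Claim_equal_quad_sequence : Prop := ∀ (lst : List Int), Dom_quad_sequence lst → Pre_quad_sequence lst → Spec_quad_sequence lst (quad_sequence lst)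

-- ===== LEMMAS AND PROOFS =====
theorem len_map_pyRange_one (f : Int → Int) (a b : Int) :
    PySem.List.len ((PySem.List.pyRange a b 1).map f) = max (b - a) 0 := by
  simp [PySem.List.len_eq, PySem.List.length_pyRange_one]

theorem quad_fit (xs : List Int) (t b c : Int)
    (h0 : xs.getD 0 0 = t + b + c)
    (h1 : xs.getD 1 0 = t * 4 + b * 2 + c)
    (hrec : ∀ i : Nat, i + 2 < xs.length →
      xs.getD (i + 2) 0 - 2 * xs.getD (i + 1) 0 + xs.getD i 0 = 2 * t) :
    ∀ i : Nat, i < xs.length →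
      xs.getD i 0 = t * ((i : Int) + 1) ^ 2 + b * ((i : Int) + 1) + c := by
  intro i
  induction i using Nat.strong_induction_on with
  | _ i ih =>
    match i with
    | 0 => intro _; rw [h0]; push_cast; ring
    | 1 => intro _; rw [h1]; push_cast; ring
    | (i + 2) =>
      intro hlt
      have e := hrec i hlt
      have g1 := ih (i + 1) (by omega) (by omega)
      have g0 := ih i (by omega) (by omega)
      have e' : xs.getD (i + 2) 0 = 2 * xs.getD (i + 1) 0 - xs.getD i 0 + 2 * t := by linarith
      rw [e', g1, g0]; push_cast; ring

theorem quad_sequence_eq_alt (x0 x1 x2 : Int) (rest : List Int)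
    (hpre : Pre_quad_sequence (x0 :: x1 :: x2 :: rest)) :
    quad_sequence (x0 :: x1 :: x2 :: rest) = quad_sequence_alt (x0 :: x1 :: x2 :: rest) := by
  obtain ⟨-, hdvd, hconst⟩ := hpre
  have hg0 : (x0 :: x1 :: x2 :: rest).getD 0 0 = x0 := rfl
  have hg1 : (x0 :: x1 :: x2 :: rest).getD 1 0 = x1 := rfl
  have hg2 : (x0 :: x1 :: x2 :: rest).getD 2 0 = x2 := rfl
  rw [hg0, hg1, hg2] at hdvd hconst
  obtain ⟨t, ht⟩ := hdvd
  have hn : PySem.List.len (x0 :: x1 :: x2 :: rest) = (rest.length : Int) + 3 := by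
    simp [PySem.List.len_eq]; ring
  set m := (rest.length : Int) with hm
  have hm0 : 0 ≤ m := by positivity
  have hall : (PySem.List.pyRange 1 (m + 3 + 1) 1).all
      (fun k => PySem.List.pyGetD (x0 :: x1 :: x2 :: rest) (k - 1) 0 ==
        PySem.Int.floordiv (x2 - 2 * x1 + x0) 2 * k * k +
          (x1 - x0 - 3 * PySem.Int.floordiv (x2 - 2 * x1 + x0) 2) * k +
          (x0 - PySem.Int.floordiv (x2 - 2 * x1 + x0) 2 -
            (x1 - x0 - 3 * PySem.Int.floordiv (x2 - 2 * x1 + x0) 2))) = true := by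
    have hlen : (x0 :: x1 :: x2 :: rest).length = rest.length + 3 := by simp
    have hafd : PySem.Int.floordiv (x2 - 2 * x1 + x0) 2 = t := by
      rw [PySem.Int.floordiv_eq_ediv_of_pos (by norm_num), ht,
        Int.mul_ediv_cancel_left _ (by norm_num)]
    have hrec : ∀ i : Nat, i + 2 < (x0 :: x1 :: x2 :: rest).length →
        (x0 :: x1 :: x2 :: rest).getD (i + 2) 0 - 2 * (x0 :: x1 :: x2 :: rest).getD (i + 1) 0 +
          (x0 :: x1 :: x2 :: rest).getD i 0 = 2 * t := by
      intro i hi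
      have h := hconst i (List.mem_range.mpr (by omega))
      rw [ht] at h
      linarith
    have hfit := quad_fit (x0 :: x1 :: x2 :: rest) t (x1 - x0 - 3 * t)
      (x0 - t - (x1 - x0 - 3 * t)) (by rw [hg0]; ring) (by rw [hg1]; ring) hrec
    rw [List.all_eq_true]
    intro k hk
    rw [PySem.List.mem_pyRange_one] at hk
    rw [hafd, beq_iff_eq]
    have hk1 : k - 1 = (((k - 1).toNat : Nat) : Int) := by omega
    rw [hk1, PySem.List.pyGetD_natCast]
    have hfk := hfit (k - 1).toNat (by omega)
    rw [hfk]
    have hc : (((k - 1).toNat : Nat) : Int) = k - 1 := by omega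
    rw [hc]
    ring
  simp only [quad_sequence, quad_sequence_alt, hn]
  rw [len_map_pyRange_one]
  have hmax : max (m + 3 + 1 - 1) 0 = m + 3 := by omega
  rw [hmax]
  simp only [hall, if_true]
  rw [PySem.List.pyRange_one_cons (show (1:Int) < m + 3 by omega),
      PySem.List.pyRange_one_cons (show (1:Int) + 1 < m + 3 by omega),
      PySem.List.pyRange_one_cons (show (1:Int) < m + 3 - 1 by omega),
      PySem.List.pyRange_one_cons (show (1:Int) < m + 3 + 1 by omega),
      PySem.List.pyRange_one_cons (show (1:Int) + 1 < m + 3 + 1 by omega)]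
  norm_num [PySem.List.pyGetD_ofNat', List.getD]
  have ha : x2 - x1 - (x1 - x0) = x2 - 2 * x1 + x0 := by ring
  rw [ha]
  intro k _ _
  ring

-- ===== VERDICT (by name: the statement is the Claim_ definition above) =====
theorem quad_sequence_spec : Claim_equal_quad_sequence := by
  intro lst _ hpre
  have hlen := hpre.1
  match lst, hlen, hpre with
  | x0 :: x1 :: x2 :: rest, _, hpre =>
    exact quad_sequence_eq_alt x0 x1 x2 rest hpre
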